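-- pv_equiv track=rewrite | github.com/XCDUX/Teaser-plus-plus | rotation.py | group_errors
-- ===== SOURCE A (Python) =====
-- def group_errors(error_dict, group_size=1):
--     groups = {}
--     sorted_keys = sorted(error_dict.keys())
--     for key in sorted_keys:
--         group_idx = (key - 1) // group_size
--         group_label = f"{group_idx*group_size+1}-{(group_idx+1)*group_size}"
--         if group_label not in groups:
--             groups[group_label] = []
--         groups[group_label].extend(error_dict[key])
--     return groups
-- ===== SOURCE B (Python) =====
-- def group_errors(error_dict, group_size=1):
--     keys = sorted(error_dict)
--     groups = {}
--     i = 0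
--     n = len(keys)
--     while i < n:
--         gi = (keys[i] - 1) // group_size
--         vals = []
--         while i < n and (keys[i] - 1) // group_size == gi:
--             vals += error_dict[keys[i]]
--             i += 1
--         groups[f"{gi * group_size + 1}-{(gi + 1) * group_size}"] = vals
--     return groups
-- ===== Notes on version B (the rewrite author's own statement) =====
-- stated objective: alternative
-- what changed: Instead of computing a label per key and extending via a dict membership test, B walks the sorted keys run by run (keys sharing a group index are contiguous once sorted), concatenates each run's error lists locally, and performs exactly one label computation and one dict assignment per group.
import Mathlib
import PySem

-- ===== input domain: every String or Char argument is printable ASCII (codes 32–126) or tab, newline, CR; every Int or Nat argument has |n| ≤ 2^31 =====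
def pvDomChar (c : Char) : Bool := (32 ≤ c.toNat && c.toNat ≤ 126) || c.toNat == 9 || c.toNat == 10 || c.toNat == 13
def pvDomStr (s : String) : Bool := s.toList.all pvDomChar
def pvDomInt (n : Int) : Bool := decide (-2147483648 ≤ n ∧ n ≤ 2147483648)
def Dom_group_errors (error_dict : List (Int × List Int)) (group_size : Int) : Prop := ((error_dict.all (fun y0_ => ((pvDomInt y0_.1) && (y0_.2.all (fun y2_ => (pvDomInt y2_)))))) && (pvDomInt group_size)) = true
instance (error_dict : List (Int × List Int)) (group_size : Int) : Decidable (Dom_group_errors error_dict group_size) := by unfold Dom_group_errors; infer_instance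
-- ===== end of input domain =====

-- B groups the sorted keys run by run (one label computation and one dict write per
-- group, no membership tests) instead of A's per-key label + membership-test + extend.
-- Equivalence of the RETURN value is proved on Pre_ (A raises ZeroDivisionError when
-- group_size = 0 and the dict is nonempty; so does B).

-- ===== PORT A =====
-- f"{group_idx*group_size+1}-{(group_idx+1)*group_size}"
def geLabel (group_size group_idx : Int) : String :=
  PySem.Int.toStr (group_idx * group_size + 1) ++ "-" ++ PySem.Int.toStr ((group_idx + 1) * group_size)

-- one iteration of A's for-loop body (groups[label].extend(...) = modify in place)
def geStepA (d : PySem.Dict Int (List Int)) (group_size : Int)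
    (groups : PySem.Dict String (List Int)) (key : Int) : PySem.Dict String (List Int) :=
  let group_idx := PySem.Int.floordiv (key - 1) group_size
  let group_label := geLabel group_size group_idx
  let groups := if groups.contains group_label then groups else groups.insert group_label []
  groups.modify group_label [] (fun v => v ++ d.getD key [])

def group_errors (error_dict : List (Int × List Int)) (group_size : Int) : List (String × List Int) :=
  let d := PySem.Dict.ofList error_dict
  let sorted_keys := PySem.List.sorted d.keys (fun k => k) false
  (sorted_keys.foldl (geStepA d group_size) PySem.Dict.empty).items

-- ===== PORT B =====
-- inner while loop of Source B: consume the run of keys whose group index is gi,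
-- accumulating vals; returns (vals, remaining keys)
def geRun (d : PySem.Dict Int (List Int)) (group_size gi : Int) (vals : List Int) :
    List Int → List Int × List Int
  | [] => (vals, [])
  | k :: ks =>
    if PySem.Int.floordiv (k - 1) group_size = gi then
      geRun d group_size gi (vals ++ d.getD k []) ks
    else (vals, k :: ks)

theorem geRun_rest_suffix (d : PySem.Dict Int (List Int)) (group_size gi : Int) :
    ∀ (l : List Int) (vals : List Int), (geRun d group_size gi vals l).2 <:+ l := by
  intro l
  induction l with
  | nil => intro vals; simp [geRun]
  | cons k ks ih =>
    intro vals
    by_cases h : PySem.Int.floordiv (k - 1) group_size = gi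
    · simpa [geRun, h] using (ih (vals ++ d.getD k [])).trans (List.suffix_cons k ks)
    · simp [geRun, h]

-- outer while loop of Source B
def geLoop (d : PySem.Dict Int (List Int)) (group_size : Int) :
    List Int → PySem.Dict String (List Int) → PySem.Dict String (List Int)
  | [], groups => groups
  | k :: ks, groups =>
    let gi := PySem.Int.floordiv (k - 1) group_size
    let p := geRun d group_size gi [] (k :: ks)
    geLoop d group_size p.2 (groups.insert (geLabel group_size gi) p.1)
  termination_by l _ => l.length
  decreasing_by
    have h : (geRun d group_size (PySem.Int.floordiv (k - 1) group_size) [] (k :: ks)).2 <:+ ks := by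
      simpa [geRun] using geRun_rest_suffix d group_size (PySem.Int.floordiv (k - 1) group_size) ks (d.getD k [])
    have := h.length_le
    simpa using Nat.lt_succ_of_le this

def group_errors_alt (error_dict : List (Int × List Int)) (group_size : Int) : List (String × List Int) :=
  let d := PySem.Dict.ofList error_dict
  let keys := PySem.List.sorted d.keys (fun k => k) false
  (geLoop d group_size keys PySem.Dict.empty).items

-- ===== PRECONDITION & SPEC =====
-- Pre_ excludes exactly the inputs where the Python A raises: group_size = 0 with a
-- nonempty dict (ZeroDivisionError at the first key).
def Pre_group_errors (error_dict : List (Int × List Int)) (group_size : Int) : Prop :=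
  error_dict = [] ∨ group_size ≠ 0
instance (error_dict : List (Int × List Int)) (group_size : Int) : Decidable (Pre_group_errors error_dict group_size) := by unfold Pre_group_errors; infer_instance

def pvWitness_group_errors : (List (Int × List Int)) × Int := ([(3, [1, 2]), (1, [5])], 2)

def Spec_group_errors (error_dict : List (Int × List Int)) (group_size : Int) (out : List (String × List Int)) : Prop := out = group_errors_alt error_dict group_size
instance (error_dict : List (Int × List Int)) (group_size : Int) (out : List (String × List Int)) : Decidable (Spec_group_errors error_dict group_size out) := by unfold Spec_group_errors; infer_instance

-- ===== CLAIM (what is proved, stated in full; the proofs are below) =====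
def Claim_equal_group_errors : Prop := ∀ (error_dict : List (Int × List Int)) (group_size : Int), Dom_group_errors error_dict group_size → Pre_group_errors error_dict group_size → Spec_group_errors error_dict group_size (group_errors error_dict group_size)

-- ===== LEMMAS AND PROOFS =====

-- ---- decimal representations: Nat.toDigits 10 is injective, nonempty, dash-free ----

theorem geDigitChar_ne_dash (k : Nat) : Nat.digitChar k ≠ '-' := by
  match k with
  | 0 => decide
  | 1 => decide
  | 2 => decide
  | 3 => decide
  | 4 => decide
  | 5 => decide
  | 6 => decide
  | 7 => decide
  | 8 => decide
  | 9 => decide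
  | 10 => decide
  | 11 => decide
  | 12 => decide
  | 13 => decide
  | 14 => decide
  | 15 => decide
  | n + 16 =>
    have h : Nat.digitChar (n + 16) = '*' := by
      unfold Nat.digitChar
      repeat rw [if_neg (by omega)]
    rw [h]; decide

theorem geTdc_suffix (fuel : Nat) : ∀ (n : Nat) (ds : List Char),
    Nat.toDigitsCore 10 fuel n ds = Nat.toDigitsCore 10 fuel n [] ++ ds := by
  induction fuel with
  | zero => intro n ds; simp [Nat.toDigitsCore]
  | succ f ih =>
    intro n ds
    by_cases h : n / 10 = 0
    · simp [Nat.toDigitsCore, h]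
    · simp only [Nat.toDigitsCore, h, if_false]
      rw [ih (n / 10) ((n % 10).digitChar :: ds), ih (n / 10) [(n % 10).digitChar]]
      simp

theorem geTdc_mem (fuel : Nat) : ∀ (n : Nat) (ds : List Char) (c : Char),
    c ∈ Nat.toDigitsCore 10 fuel n ds → c ∈ ds ∨ ∃ m, c = Nat.digitChar m := by
  induction fuel with
  | zero => intro n ds c hc; exact Or.inl (by simpa [Nat.toDigitsCore] using hc)
  | succ f ih =>
    intro n ds c hc
    by_cases h : n / 10 = 0
    · simp only [Nat.toDigitsCore, h, if_true] at hc
      rcases List.mem_cons.mp hc with h' | h'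
      · exact Or.inr ⟨n % 10, h'⟩
      · exact Or.inl h'
    · simp only [Nat.toDigitsCore, h, if_false] at hc
      rcases ih (n / 10) ((n % 10).digitChar :: ds) c hc with h' | h'
      · rcases List.mem_cons.mp h' with h'' | h''
        · exact Or.inr ⟨n % 10, h''⟩
        · exact Or.inl h''
      · exact Or.inr h'

theorem geTdc_ne_nil (fuel : Nat) : ∀ (n : Nat) (ds : List Char),
    Nat.toDigitsCore 10 (fuel + 1) n ds ≠ [] := by
  induction fuel with
  | zero =>
    intro n ds
    by_cases h : n / 10 = 0 <;> simp [Nat.toDigitsCore, h]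
  | succ f ih =>
    intro n ds
    by_cases h : n / 10 = 0
    · simp [Nat.toDigitsCore, h]
    · simp only [Nat.toDigitsCore, h, if_false]
      exact ih (n / 10) _

def geEv (cs : List Char) : Nat := cs.foldl (fun a c => 10 * a + (c.toNat - 48)) 0

theorem geDigitVal (m : Nat) (hm : m < 10) : (Nat.digitChar m).toNat - 48 = m := by
  interval_cases m <;> decide

theorem geTdc_ev (fuel : Nat) : ∀ (n : Nat), n < 10 ^ fuel →
    geEv (Nat.toDigitsCore 10 fuel n []) = n := by
  induction fuel with
  | zero => intro n hn; interval_cases n; simp [Nat.toDigitsCore, geEv]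
  | succ f ih =>
    intro n hn
    by_cases h : n / 10 = 0
    · have h10 : n % 10 < 10 := Nat.mod_lt _ (by norm_num)
      have : n = n % 10 := by omega
      simp [Nat.toDigitsCore, h, geEv, geDigitVal _ h10]
      omega
    · simp only [Nat.toDigitsCore, h, if_false]
      rw [geTdc_suffix]
      have hdiv : n / 10 < 10 ^ f := by
        rw [Nat.div_lt_iff_lt_mul (by norm_num)]
        calc n < 10 ^ (f + 1) := hn
        _ = 10 ^ f * 10 := by ring
      have hev : geEv (Nat.toDigitsCore 10 f (n / 10) [] ++ [(n % 10).digitChar])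
          = 10 * geEv (Nat.toDigitsCore 10 f (n / 10) []) + ((n % 10).digitChar.toNat - 48) := by
        simp [geEv, List.foldl_append]
      rw [hev, ih _ hdiv, geDigitVal _ (Nat.mod_lt _ (by norm_num))]
      omega

theorem geToDigits_inj {m n : Nat} (h : Nat.toDigits 10 m = Nat.toDigits 10 n) : m = n := by
  have hm : m < 10 ^ (m + 1) :=
    lt_of_lt_of_le (Nat.lt_pow_self (by norm_num)) (Nat.pow_le_pow_right (by norm_num) (by omega))
  have hn : n < 10 ^ (n + 1) :=
    lt_of_lt_of_le (Nat.lt_pow_self (by norm_num)) (Nat.pow_le_pow_right (by norm_num) (by omega))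
  have := geTdc_ev (m + 1) m hm
  rw [show Nat.toDigitsCore 10 (m + 1) m [] = Nat.toDigits 10 m from rfl, h,
    show Nat.toDigits 10 n = Nat.toDigitsCore 10 (n + 1) n [] from rfl, geTdc_ev (n + 1) n hn] at this
  omega

theorem geToDigits_no_dash {n : Nat} {c : Char} (hc : c ∈ Nat.toDigits 10 n) : c ≠ '-' := by
  rcases geTdc_mem (n + 1) n [] c hc with h | ⟨m, rfl⟩
  · simp at h
  · exact geDigitChar_ne_dash m

theorem geToDigits_ne_nil (n : Nat) : Nat.toDigits 10 n ≠ [] := geTdc_ne_nil n n []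

-- ---- PySem.Int.toChars: shape and injectivity ----

theorem geToChars_shape (n : Int) : ∃ h t, PySem.Int.toChars n = h :: t ∧ ∀ c ∈ t, c ≠ '-' := by
  unfold PySem.Int.toChars
  by_cases hn : n < 0
  · exact ⟨'-', Nat.toDigits 10 n.natAbs, by simp [hn], fun c hc => geToDigits_no_dash hc⟩
  · rcases List.exists_cons_of_ne_nil (geToDigits_ne_nil n.toNat) with ⟨h, t, ht⟩
    exact ⟨h, t, by simp [hn, ht], fun c hc => geToDigits_no_dash (ht ▸ List.mem_cons_of_mem h hc)⟩

theorem geToChars_inj {m n : Int} (h : PySem.Int.toChars m = PySem.Int.toChars n) : m = n := by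
  unfold PySem.Int.toChars at h
  by_cases hm : m < 0 <;> by_cases hn : n < 0 <;> simp [hm, hn] at h
  · have := geToDigits_inj h; omega
  · exfalso
    exact geToDigits_no_dash (h ▸ List.mem_cons_self ..) rfl
  · exfalso
    exact geToDigits_no_dash (h ▸ List.mem_cons_self ..) rfl
  · have := geToDigits_inj h; omega

-- ---- splitting at the separator dash is unambiguous ----

theorem geSplitDash : ∀ (t1 t2 y1 y2 : List Char), (∀ c ∈ t1, c ≠ '-') → (∀ c ∈ t2, c ≠ '-') →
    t1 ++ '-' :: y1 = t2 ++ '-' :: y2 → t1 = t2 := by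
  intro t1
  induction t1 with
  | nil =>
    intro t2 y1 y2 _ h2 heq
    cases t2 with
    | nil => rfl
    | cons c t2' =>
      exfalso
      simp only [List.nil_append, List.cons_append, List.cons.injEq] at heq
      exact h2 c (List.mem_cons_self ..) heq.1.symm
  | cons c t1' ih =>
    intro t2 y1 y2 h1 h2 heq
    cases t2 with
    | nil =>
      exfalso
      simp only [List.nil_append, List.cons_append, List.cons.injEq] at heq
      exact h1 c (List.mem_cons_self ..) heq.1
    | cons c' t2' =>
      simp only [List.cons_append, List.cons.injEq] at heq
      rw [heq.1, ih t2' y1 y2 (fun x hx => h1 x (List.mem_cons_of_mem c hx))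
        (fun x hx => h2 x (List.mem_cons_of_mem c' hx)) heq.2]

theorem geLabel_inj {group_size g1 g2 : Int} (hgs : group_size ≠ 0)
    (h : geLabel group_size g1 = geLabel group_size g2) : g1 = g2 := by
  unfold geLabel at h
  have h' := congrArg String.toList h
  simp only [String.toList_append, PySem.Int.toList_toStr] at h'
  have hdash : ("-" : String).toList = ['-'] := by decide
  rw [hdash] at h'
  rcases geToChars_shape (g1 * group_size + 1) with ⟨a1, s1, e1, f1⟩
  rcases geToChars_shape (g2 * group_size + 1) with ⟨a2, s2, e2, f2⟩
  rw [e1, e2] at h'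
  simp only [List.cons_append, List.append_assoc, List.cons.injEq] at h'
  have hs : s1 = s2 := geSplitDash s1 s2 _ _ f1 f2 h'.2
  have : PySem.Int.toChars (g1 * group_size + 1) = PySem.Int.toChars (g2 * group_size + 1) := by
    rw [e1, e2, h'.1, hs]
  have := geToChars_inj this
  have : g1 * group_size = g2 * group_size := by omega
  exact mul_right_cancel₀ hgs this

-- ---- floordiv monotonicity ----

theorem geFloordiv_mono_pos {b x y : Int} (hb : 0 < b) (hxy : x ≤ y) :
    PySem.Int.floordiv x b ≤ PySem.Int.floordiv y b := by
  by_contra hlt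
  have h1 := PySem.Int.floordiv_mul_add_mod x b
  have h2 := PySem.Int.floordiv_mul_add_mod y b
  have r1 := PySem.Int.mod_nonneg (a := x) hb
  have r2 := PySem.Int.mod_lt (a := y) hb
  have hmul : (PySem.Int.floordiv y b + 1) * b ≤ PySem.Int.floordiv x b * b :=
    mul_le_mul_of_nonneg_right (by omega) (le_of_lt hb)
  nlinarith

theorem geFloordiv_anti_neg {b x y : Int} (hb : b < 0) (hxy : x ≤ y) :
    PySem.Int.floordiv y b ≤ PySem.Int.floordiv x b := by
  by_contra hlt
  have h1 := PySem.Int.floordiv_mul_add_mod x b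
  have h2 := PySem.Int.floordiv_mul_add_mod y b
  have r1 := PySem.Int.mod_neg_bounds x hb
  have r2 := PySem.Int.mod_neg_bounds y hb
  have hmul : PySem.Int.floordiv y b * b ≤ (PySem.Int.floordiv x b + 1) * b :=
    mul_le_mul_of_nonpos_right (by omega) (le_of_lt hb)
  nlinarith

-- ---- the run lemma: A's fold over a run = B's geRun ----

theorem geRun_rest_head (d : PySem.Dict Int (List Int)) (group_size gi : Int) :
    ∀ (l : List Int) (vals : List Int) (r : Int) (rs : List Int),
    (geRun d group_size gi vals l).2 = r :: rs → PySem.Int.floordiv (r - 1) group_size ≠ gi := by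
  intro l
  induction l with
  | nil => intro vals r rs h; simp [geRun] at h
  | cons k ks ih =>
    intro vals r rs h
    by_cases hk : PySem.Int.floordiv (k - 1) group_size = gi
    · exact ih (vals ++ d.getD k []) r rs (by simpa [geRun, hk] using h)
    · simp [geRun, hk] at h
      rw [← h.1]; exact hk

theorem geRunFold (d : PySem.Dict Int (List Int)) (group_size g : Int) :
    ∀ (ks : List Int) (vals : List Int) (groups : PySem.Dict String (List Int)),
    (∀ z ∈ ks, PySem.Int.floordiv (z - 1) group_size ≠ g →
      groups.contains (geLabel group_size (PySem.Int.floordiv (z - 1) group_size)) = false) →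
    ks.foldl (geStepA d group_size) (groups.insert (geLabel group_size g) vals)
      = (geRun d group_size g vals ks).2.foldl (geStepA d group_size)
          (groups.insert (geLabel group_size g) (geRun d group_size g vals ks).1) := by
  intro ks
  induction ks with
  | nil => intro vals groups _; simp [geRun]
  | cons z ks' ih =>
    intro vals groups hcon
    by_cases hz : PySem.Int.floordiv (z - 1) group_size = g
    · have hstep : geStepA d group_size (groups.insert (geLabel group_size g) vals) z
          = groups.insert (geLabel group_size g) (vals ++ d.getD z []) := by
        simp [geStepA, hz, PySem.Dict.contains_insert_self, PySem.Dict.modify,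
          PySem.Dict.getD_insert_self, PySem.Dict.insert_insert_self]
      rw [List.foldl_cons, hstep, ih (vals ++ d.getD z []) groups
        (fun x hx => hcon x (List.mem_cons_of_mem z hx))]
      simp [geRun, hz]
    · simp [geRun, hz]

-- ---- main loop equivalence ----

theorem geGiNe {group_size : Int} (g : Int) (hgs : group_size ≠ 0) {k r z : Int} (hkr : k < r) (hrz : r ≤ z)
    (hg : PySem.Int.floordiv (k - 1) group_size = g)
    (hr : PySem.Int.floordiv (r - 1) group_size ≠ g) :
    PySem.Int.floordiv (z - 1) group_size ≠ g := by
  rcases lt_or_gt_of_ne hgs with hneg | hpos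
  · have h1 := geFloordiv_anti_neg hneg (show (k - 1 : Int) ≤ r - 1 by omega)
    have h2 := geFloordiv_anti_neg hneg (show (r - 1 : Int) ≤ z - 1 by omega)
    omega
  · have h1 := geFloordiv_mono_pos hpos (show (k - 1 : Int) ≤ r - 1 by omega)
    have h2 := geFloordiv_mono_pos hpos (show (r - 1 : Int) ≤ z - 1 by omega)
    omega

theorem geSortedStrict (xs : List Int) (h : xs.Nodup) :
    List.Pairwise (· < ·) (PySem.List.sorted xs (fun k => k) false) := by
  have h1 := PySem.List.sorted_pairwise xs (fun k => k)
  have h2 : (PySem.List.sorted xs (fun k => k) false).Nodup :=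
    ((PySem.List.sorted_perm xs (fun k => k) false).symm).nodup h
  exact (h1.and h2).imp (fun hab => lt_of_le_of_ne hab.1 hab.2)

theorem geMain (d : PySem.Dict Int (List Int)) (group_size : Int) (hgs : group_size ≠ 0) :
    ∀ (ks : List Int) (groups : PySem.Dict String (List Int)),
    List.Pairwise (· < ·) ks →
    (∀ k ∈ ks, groups.contains (geLabel group_size (PySem.Int.floordiv (k - 1) group_size)) = false) →
    ks.foldl (geStepA d group_size) groups = geLoop d group_size ks groups := by
  intro ks groups
  induction ks, groups using geLoop.induct d group_size with
  | case1 groups => intro _ _; simp [geLoop]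
  | case2 k ks groups gi0 p0 ih =>
    intro hpw hcon
    set g := PySem.Int.floordiv (k - 1) group_size with hgdef
    set p := geRun d group_size g [] (k :: ks) with hpdef
    have hk0 : groups.contains (geLabel group_size g) = false := hcon k (List.mem_cons_self ..)
    have hstep1 : geStepA d group_size groups k
        = groups.insert (geLabel group_size g) (d.getD k []) := by
      simp [geStepA, hk0, PySem.Dict.modify, PySem.Dict.getD_insert_self,
        PySem.Dict.insert_insert_self, ← hgdef]
    have hrun : p = geRun d group_size g (d.getD k []) ks := by
      rw [hpdef]; simp [geRun, ← hgdef]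
    have hsuff : p.2 <:+ ks := by
      rw [hrun]; exact geRun_rest_suffix d group_size g ks (d.getD k [])
    have hpw2 : List.Pairwise (· < ·) p.2 :=
      List.Pairwise.sublist hsuff.sublist (List.pairwise_cons.mp hpw).2
    have hne : ∀ z ∈ p.2, PySem.Int.floordiv (z - 1) group_size ≠ g := by
      intro z hz
      rcases List.exists_cons_of_ne_nil (List.ne_nil_of_mem hz) with ⟨r, rs, hrr⟩
      have hrhead : PySem.Int.floordiv (r - 1) group_size ≠ g :=
        geRun_rest_head d group_size g ks (d.getD k []) r rs (by rw [← hrun, hrr])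
      have hrks : r ∈ ks := hsuff.subset (hrr ▸ List.mem_cons_self ..)
      have hkr : k < r := (List.pairwise_cons.mp hpw).1 r hrks
      have hrz : r ≤ z := by
        rw [hrr] at hz hpw2
        rcases List.mem_cons.mp hz with rfl | hz'
        · exact le_refl z
        · exact le_of_lt ((List.pairwise_cons.mp hpw2).1 z hz')
      exact geGiNe g hgs hkr hrz hgdef.symm hrhead
    have hcon2 : ∀ z ∈ p.2,
        (groups.insert (geLabel group_size g) p.1).contains
          (geLabel group_size (PySem.Int.floordiv (z - 1) group_size)) = false := by
      intro z hz
      have hlblne : geLabel group_size (PySem.Int.floordiv (z - 1) group_size) ≠ geLabel group_size g :=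
        fun hlab => hne z hz (geLabel_inj hgs hlab)
      rw [PySem.Dict.contains_insert]
      simp only [beq_eq_false_iff_ne, ne_eq, Bool.or_eq_false_iff]
      exact ⟨by simpa using hlblne, hcon z (List.mem_cons_of_mem k (hsuff.subset hz))⟩
    have hfold : ks.foldl (geStepA d group_size) (groups.insert (geLabel group_size g) (d.getD k []))
        = p.2.foldl (geStepA d group_size) (groups.insert (geLabel group_size g) p.1) := by
      rw [hrun]
      exact geRunFold d group_size g ks (d.getD k []) groups
        (fun z hz _ => hcon z (List.mem_cons_of_mem k hz))
    calc (k :: ks).foldl (geStepA d group_size) groups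
        = ks.foldl (geStepA d group_size) (geStepA d group_size groups k) := List.foldl_cons ..
      _ = ks.foldl (geStepA d group_size) (groups.insert (geLabel group_size g) (d.getD k [])) := by
          rw [hstep1]
      _ = p.2.foldl (geStepA d group_size) (groups.insert (geLabel group_size g) p.1) := hfold
      _ = geLoop d group_size p.2 (groups.insert (geLabel group_size g) p.1) := ih hpw2 hcon2
      _ = geLoop d group_size (k :: ks) groups := by
          conv_rhs => rw [geLoop]


-- ===== VERDICT (by name: the statement is the Claim_ definition above) =====
theorem group_errors_spec : Claim_equal_group_errors := by
  unfold Claim_equal_group_errors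
  intro error_dict group_size _ hpre
  unfold Spec_group_errors group_errors group_errors_alt
  dsimp only
  rcases hpre with hed | hgs
  · subst hed
    have hkeys : (PySem.Dict.ofList ([] : List (Int × List Int))).keys = [] := rfl
    rw [hkeys]
    have hs : PySem.List.sorted ([] : List Int) (fun k => k) false = [] := rfl
    rw [hs]
    simp [geLoop]
  · exact congrArg PySem.Dict.items
      (geMain (PySem.Dict.ofList error_dict) group_size hgs
        (PySem.List.sorted (PySem.Dict.ofList error_dict).keys (fun k => k) false)
        PySem.Dict.empty
        (geSortedStrict _ (PySem.Dict.nodup_keys_ofList error_dict))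
        (fun k _ => PySem.Dict.contains_empty _))
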